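-- pv_equiv track=rewrite | github.com/AvivYaniv/Project-Euler | Solutions/90.py | get_numbers_representables_cubes
-- ===== SOURCE A (Python) =====
-- from itertools import product
-- from itertools import permutations
-- from itertools import combinations
--
-- CUBE_SIDES  =   6
--
-- def number_to_tuple(number, tuple_length=None, digit_replacement={}):
--     number_as_string    = str(number)
--     number_length       = len(number_as_string)
--     tuple_length        = tuple_length if tuple_length else number_length
--     zero_padding        = [0] * (tuple_length - number_length)
--     number_digits       = [int(d) for d in number_as_string]
--     if digit_replacement:
--         number_digits   = [ d if d not in digit_replacement.keys() else digit_replacement[d] for d in number_digits ]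
--     return tuple(zero_padding + number_digits)
--
-- def is_numbers_cube_repesentable(number, cubes, digit_replacement={}):
--     number_as_tuple = number_to_tuple(number, len(cubes), digit_replacement)
--     return any(number_permutation in product(*cubes)
--                for number_permutation in permutations(number_as_tuple))
--
-- def are_numbers_cube_repesentable(numbers, cubes, digit_replacement={}):
--     return all(is_numbers_cube_repesentable(number, cubes, digit_replacement) for number in numbers)
--
-- def get_numbers_representables_cubes(numbers, digit_replacement={}):
--     numbers_representable_cubes     = []
--     other_cube                      = []
--     cubes_digits                    = [ d if d not in digit_replacement.keys() else digit_replacement[d] for d in range(10) ]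
--     for cube_1 in list(combinations(cubes_digits, CUBE_SIDES)):
--         for cube_2 in other_cube:
--             cubes = (cube_1, cube_2)
--             if are_numbers_cube_repesentable(numbers, cubes, digit_replacement):
--                 numbers_representable_cubes.append(cubes)
--         other_cube.append(cube_1)
--     return numbers_representable_cubes
-- ===== SOURCE B (Python) =====
-- from itertools import combinations
--
-- CUBE_SIDES = 6
--
-- def get_numbers_representables_cubes(numbers, digit_replacement={}):
--     # Decide each (number, cube pair) by a direct set-membership test on the number's
--     # two padded/replaced digits instead of enumerating permutations x product(*cubes).
--     def two_digits(number):
--         digits = [digit_replacement.get(int(ch), int(ch)) for ch in str(number)]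
--         if len(digits) < 2:
--             digits = [0] * (2 - len(digits)) + digits
--         return digits
--
--     def representable(number, s1, s2):
--         t = two_digits(number)
--         return len(t) == 2 and ((t[0] in s1 and t[1] in s2) or
--                                 (t[1] in s1 and t[0] in s2))
--
--     cubes_digits = [digit_replacement.get(d, d) for d in range(10)]
--     result = []
--     other_cube = []
--     for cube_1 in combinations(cubes_digits, CUBE_SIDES):
--         s1 = frozenset(cube_1)
--         for cube_2, s2 in other_cube:
--             if all(representable(number, s1, s2) for number in numbers):
--                 result.append((cube_1, cube_2))
--         other_cube.append((cube_1, s1))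
--     return result
-- ===== Notes on version B (the rewrite author's own statement) =====
-- stated objective: faster
-- what changed: The any(perm in product(*cubes) for perm in permutations(t)) representability test is replaced by a direct membership test of the number's two padded/replaced digits in per-cube frozensets, guarded by len(t)==2; the permutations and Cartesian-product enumeration disappears.
-- outside the precondition, e.g. on get_numbers_representables_cubes([-1], {}): A raises ValueError, B raises ValueError; on get_numbers_representables_cubes([11, 22, 33, 44, 55, 66, 77, -1], {}): A returns [], B returns []
import Mathlib
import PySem

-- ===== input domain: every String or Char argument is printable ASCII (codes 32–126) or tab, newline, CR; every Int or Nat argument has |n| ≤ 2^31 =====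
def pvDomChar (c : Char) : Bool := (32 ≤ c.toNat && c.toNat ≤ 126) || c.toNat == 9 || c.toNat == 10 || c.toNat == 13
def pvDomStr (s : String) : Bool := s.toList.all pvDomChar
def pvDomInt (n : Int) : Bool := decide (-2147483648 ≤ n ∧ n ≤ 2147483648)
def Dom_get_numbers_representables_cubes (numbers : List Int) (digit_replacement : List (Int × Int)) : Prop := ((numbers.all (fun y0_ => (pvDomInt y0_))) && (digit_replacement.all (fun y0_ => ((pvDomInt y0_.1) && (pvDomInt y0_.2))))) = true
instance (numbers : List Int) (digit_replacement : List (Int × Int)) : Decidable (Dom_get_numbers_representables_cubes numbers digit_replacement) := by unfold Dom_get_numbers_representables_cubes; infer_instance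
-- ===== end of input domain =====

-- B replaces A's permutations-in-product representability test by a direct membership test of the
-- number's two padded/replaced digits in per-cube sets (objective: faster).

-- ===== PORT A =====
-- shared dict-get helper: python `digit_replacement[d]` / `.get(d, d)` on the dict built from the list
def pyDictD (dr : List (Int × Int)) (d : Int) : Int := (PySem.Dict.ofList dr).getD d d

-- itertools.combinations(xs, k), in Python's order
def pyCombinations (xs : List Int) (k : Nat) : List (List Int) :=
  match k, xs with
  | 0, _ => [[]]
  | _ + 1, [] => []
  | k + 1, x :: rest => (pyCombinations rest k).map (fun c => x :: c) ++ pyCombinations rest (k + 1)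

def number_to_tuple (number : Int) (tuple_length : Option Int) (dr : List (Int × Int)) : List Int :=
  let number_as_string := PySem.Int.toChars number
  let number_length : Int := number_as_string.length
  let tl : Int := match tuple_length with
    | some t => if t ≠ 0 then t else number_length
    | none => number_length
  let zero_padding : List Int := List.replicate (tl - number_length).toNat 0
  let number_digits := number_as_string.map (fun ch => (PySem.Int.ofChars? [ch]).getD 0)
  let number_digits := if dr ≠ [] then
      number_digits.map (fun d => if (PySem.Dict.ofList dr).contains d then pyDictD dr d else d)
    else number_digits
  zero_padding ++ number_digits

def is_numbers_cube_repesentable (number : Int) (cubes : List Int × List Int) (dr : List (Int × Int)) : Bool :=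
  let t := number_to_tuple number (some 2) dr
  (PySem.List.permutations t t.length).any (fun p =>
    (cubes.1.flatMap (fun a => cubes.2.map (fun b => [a, b]))).contains p)

def are_numbers_cube_repesentable (numbers : List Int) (cubes : List Int × List Int) (dr : List (Int × Int)) : Bool :=
  numbers.all (fun n => is_numbers_cube_repesentable n cubes dr)

def get_numbers_representables_cubes (numbers : List Int) (digit_replacement : List (Int × Int)) : List (List Int × List Int) :=
  let cubes_digits := (PySem.List.pyRange 0 10 1).map (fun d =>
    if (PySem.Dict.ofList digit_replacement).contains d then pyDictD digit_replacement d else d)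
  ((pyCombinations cubes_digits 6).foldl
    (fun (st : List (List Int × List Int) × List (List Int)) cube_1 =>
      (st.2.foldl (fun acc cube_2 =>
          if are_numbers_cube_repesentable numbers (cube_1, cube_2) digit_replacement
          then acc ++ [(cube_1, cube_2)] else acc) st.1,
       st.2 ++ [cube_1]))
    ([], [])).1

-- ===== PORT B =====
def targetOf (dr : List (Int × Int)) (number : Int) : List Int :=
  let digits := (PySem.Int.toChars number).map (fun ch => pyDictD dr ((PySem.Int.ofChars? [ch]).getD 0))
  if digits.length < 2 then List.replicate (2 - digits.length) 0 ++ digits else digits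

def representable (dr : List (Int × Int)) (number : Int) (s1 s2 : PySem.Set Int) : Bool :=
  let t := targetOf dr number
  t.length == 2 &&
    ((PySem.Set.contains s1 (t.getD 0 0) && PySem.Set.contains s2 (t.getD 1 0)) ||
     (PySem.Set.contains s1 (t.getD 1 0) && PySem.Set.contains s2 (t.getD 0 0)))

def get_numbers_representables_cubes_alt (numbers : List Int) (digit_replacement : List (Int × Int)) : List (List Int × List Int) :=
  let cubes_digits := (PySem.List.pyRange 0 10 1).map (pyDictD digit_replacement)
  ((pyCombinations cubes_digits 6).foldl
    (fun (st : List (List Int × List Int) × List (List Int × PySem.Set Int)) cube_1 =>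
      let s1 := PySem.Set.ofList cube_1
      (st.2.foldl (fun acc c2 =>
          if numbers.all (fun number => representable digit_replacement number s1 c2.2)
          then acc ++ [(cube_1, c2.1)] else acc) st.1,
       st.2 ++ [(cube_1, s1)]))
    ([], [])).1

-- ===== PRECONDITION & SPEC =====
-- Pre_ excludes lists where a negative number is reachable (both Pythons raise ValueError at int('-')
-- there): a negative is never reached when an earlier number ≥ 100 makes every cube pair fail first;
-- the rare excluded lists whose all-below-100 prefix is unrepresentable by every pair also return ([] from both).
def Pre_get_numbers_representables_cubes (numbers : List Int) (digit_replacement : List (Int × Int)) : Prop :=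
  (∀ n ∈ numbers, 0 ≤ n) ∨ (∃ n ∈ numbers.takeWhile (fun n => decide (0 ≤ n)), 100 ≤ n)
instance (numbers : List Int) (digit_replacement : List (Int × Int)) : Decidable (Pre_get_numbers_representables_cubes numbers digit_replacement) := by unfold Pre_get_numbers_representables_cubes; infer_instance
def pvWitness_get_numbers_representables_cubes : List Int × (List (Int × Int)) := ([3, 16], [(9, 6)])

def Spec_get_numbers_representables_cubes (numbers : List Int) (digit_replacement : List (Int × Int)) (out : List (List Int × List Int)) : Prop := out = get_numbers_representables_cubes_alt numbers digit_replacement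
instance (numbers : List Int) (digit_replacement : List (Int × Int)) (out : List (List Int × List Int)) : Decidable (Spec_get_numbers_representables_cubes numbers digit_replacement out) := by unfold Spec_get_numbers_representables_cubes; infer_instance

-- ===== CLAIM (what is proved, stated in full; the proofs are below) =====
def Claim_equal_get_numbers_representables_cubes : Prop := ∀ (numbers : List Int) (digit_replacement : List (Int × Int)), Dom_get_numbers_representables_cubes numbers digit_replacement → Pre_get_numbers_representables_cubes numbers digit_replacement → Spec_get_numbers_representables_cubes numbers digit_replacement (get_numbers_representables_cubes numbers digit_replacement)

-- ===== LEMMAS AND PROOFS =====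

-- the list-level form of B's per-pair predicate element test (proof-only helper)
def checkL (t c1 c2 : List Int) : Bool :=
  t.length == 2 && ((c1.contains (t.getD 0 0) && c2.contains (t.getD 1 0)) ||
                    (c1.contains (t.getD 1 0) && c2.contains (t.getD 0 0)))

theorem guard_eq (dr : List (Int × Int)) (d : Int) :
    (if (PySem.Dict.ofList dr).contains d then pyDictD dr d else d) = pyDictD dr d := by
  by_cases h : (PySem.Dict.ofList dr).contains d
  · simp [h]
  · have h2 : (PySem.Dict.ofList dr).get? d = none := by
      rw [PySem.Dict.get?_eq_none_iff_contains]; simp [h]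
    simp [h, pyDictD, PySem.Dict.getD, h2]

theorem setContains_ofList (c : List Int) (x : Int) :
    PySem.Set.contains (PySem.Set.ofList c) x = c.contains x := by
  simp [pysem]

theorem pyDictD_nil (d : Int) : pyDictD [] d = d := rfl

theorem pad_eq (l : List Int) (m : Nat) (hm : l.length = m) :
    List.replicate (((2:Int) - (m:Int)).toNat) 0 ++ l
      = if m < 2 then List.replicate (2 - m) 0 ++ l else l := by
  subst hm
  by_cases h : l.length < 2
  · rw [if_pos h]; congr 1; congr 1; omega
  · rw [if_neg h]
    have : ((2:Int) - (l.length:Int)).toNat = 0 := by omega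
    rw [this]; simp

theorem number_to_tuple_eq_targetOf (dr : List (Int × Int)) (n : Int) :
    number_to_tuple n (some 2) dr = targetOf dr n := by
  unfold number_to_tuple targetOf
  simp only [guard_eq, List.map_map, List.length_map]
  by_cases hdr : dr = []
  · subst hdr
    simp only [ne_eq, not_true_eq_false, if_false, pyDictD_nil]
    exact pad_eq _ _ (by simp)
  · simp only [ne_eq, hdr, not_false_eq_true, if_true]
    exact pad_eq _ _ (by simp)

theorem check_eq (t c1 c2 : List Int) :
    ((PySem.List.permutations t t.length).any (fun p =>
      (c1.flatMap (fun a => c2.map (fun b => [a, b]))).contains p)) = checkL t c1 c2 := by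
  by_cases h2 : t.length = 2
  · obtain ⟨x, y, rfl⟩ := List.length_eq_two.mp h2
    show (PySem.List.permutations [x, y] 2).any _ = _
    rw [show PySem.List.permutations [x, y] 2 = [[x, y], [y, x]] from rfl]
    simp [checkL, List.any_cons, List.mem_flatMap, List.mem_map]
  · have hr : checkL t c1 c2 = false := by
      simp [checkL]; omega
    rw [hr]
    apply List.any_eq_false.mpr
    intro p hp
    have hperm := PySem.List.perm_of_mem_permutations hp
    have hlen : p.length = t.length := hperm.length_eq
    simp only [List.contains_iff_mem, List.mem_flatMap, List.mem_map]
    rintro ⟨a, _, b, _, rfl⟩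
    simp at hlen; omega

theorem representable_eq_checkL (dr : List (Int × Int)) (n : Int) (c1 c2 : List Int) :
    representable dr n (PySem.Set.ofList c1) (PySem.Set.ofList c2) = checkL (targetOf dr n) c1 c2 := by
  unfold representable checkL
  simp only [setContains_ofList]

theorem are_rep_eq (numbers : List Int) (dr : List (Int × Int)) (c1 c2 : List Int) :
    are_numbers_cube_repesentable numbers (c1, c2) dr
      = numbers.all (fun n => representable dr n (PySem.Set.ofList c1) (PySem.Set.ofList c2)) := by
  unfold are_numbers_cube_repesentable is_numbers_cube_repesentable
  simp only [number_to_tuple_eq_targetOf, check_eq, representable_eq_checkL]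

theorem inner_eq (numbers : List Int) (dr : List (Int × Int)) (c1 : List Int) :
    ∀ (other : List (List Int)) (acc : List (List Int × List Int)),
      other.foldl (fun acc cube_2 =>
          if are_numbers_cube_repesentable numbers (c1, cube_2) dr
          then acc ++ [(c1, cube_2)] else acc) acc
      = (other.map (fun c => (c, PySem.Set.ofList c))).foldl (fun acc p =>
          if numbers.all (fun number => representable dr number (PySem.Set.ofList c1) p.2)
          then acc ++ [(c1, p.1)] else acc) acc := by
  intro other
  induction other with
  | nil => intro acc; rfl
  | cons c rest ih =>
    intro acc
    simp only [List.map_cons, List.foldl_cons]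
    rw [are_rep_eq]
    exact ih _

theorem outer_eq (numbers : List Int) (dr : List (Int × Int)) :
    ∀ (combos : List (List Int)) (acc : List (List Int × List Int)) (other : List (List Int)),
      (combos.foldl (fun (st : List (List Int × List Int) × List (List Int)) cube_1 =>
          (st.2.foldl (fun acc cube_2 =>
              if are_numbers_cube_repesentable numbers (cube_1, cube_2) dr
              then acc ++ [(cube_1, cube_2)] else acc) st.1,
           st.2 ++ [cube_1])) (acc, other)).1
      = (combos.foldl (fun (st : List (List Int × List Int) × List (List Int × PySem.Set Int)) cube_1 =>
          let s1 := PySem.Set.ofList cube_1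
          (st.2.foldl (fun acc c2 =>
              if numbers.all (fun number => representable dr number s1 c2.2)
              then acc ++ [(cube_1, c2.1)] else acc) st.1,
           st.2 ++ [(cube_1, s1)])) (acc, other.map (fun c => (c, PySem.Set.ofList c)))).1 := by
  intro combos
  induction combos with
  | nil => intro acc other; rfl
  | cons c rest ih =>
    intro acc other
    simp only [List.foldl_cons]
    have h2 : (other.map (fun c => (c, PySem.Set.ofList c))) ++ [(c, PySem.Set.ofList c)]
        = (other ++ [c]).map (fun c => (c, PySem.Set.ofList c)) := by
      simp
    rw [inner_eq numbers dr c other acc]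
    show _ = (List.foldl _ (_, (other.map (fun c => (c, PySem.Set.ofList c))) ++ [(c, PySem.Set.ofList c)]) rest).1
    rw [h2]
    exact ih _ _

theorem main_eq (numbers : List Int) (dr : List (Int × Int)) :
    get_numbers_representables_cubes numbers dr = get_numbers_representables_cubes_alt numbers dr := by
  unfold get_numbers_representables_cubes get_numbers_representables_cubes_alt
  simp only [guard_eq]
  exact outer_eq numbers dr _ [] []

-- ===== VERDICT (by name: the statement is the Claim_ definition above) =====
theorem get_numbers_representables_cubes_spec : Claim_equal_get_numbers_representables_cubes := by
  intro numbers digit_replacement _ _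
  unfold Spec_get_numbers_representables_cubes
  exact main_eq numbers digit_replacement
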